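-- pv_equiv track=rewrite | github.com/Otoast/Research-Proj-Repository | RISKInterface/app/weather_functions.py | get_temp_rating
-- ===== SOURCE A (Python) =====
-- TEMPERATURE_CATEGORIES = {
--     'Extreme Cold': 'High risk of hypothermia and frostbite. Protective clothing is essential. Wind chill can make it feel much colder than the actual temperature.',
--     'Cold': 'Risk of hypothermia if exposed for long periods without proper clothing. Generally uncomfortable for extended outdoor activities without protection.',
--     'Cool': 'Mildly uncomfortable without appropriate clothing. Safe for most outdoor activities with proper attire.',
--     'Mild': 'Comfortable for most outdoor activities. Light to moderate clothing is suitable.',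
--     'Warm': 'Generally comfortable. Ideal for outdoor activities.',
--     'Hot': 'Can be uncomfortable, especially with high humidity. Heat-related illnesses can occur with prolonged exposure and activity.',
--     'Very Hot': 'High risk of heat-related illnesses. Limit strenuous activities and ensure adequate hydration.',
--     'Extreme Heat': 'Severe risk of heat-related illnesses. Avoid strenuous activities, seek shade, and stay hydrated.'
-- }
--
-- def get_temp_rating(degrees):
--         key = None
--         options = ['Extreme Cold', 'Cold', 'Cool', 'Mild', 'Warm', 'Hot', 'Very Hot', 'Extreme Heat']
--         for i, extrema in enumerate([32, 50, 59, 70, 81, 90, 100]):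
--             if degrees <= extrema:
--                 key = options[i]
--                 return key, TEMPERATURE_CATEGORIES[key]
--         key = options[-1]
--         return key, TEMPERATURE_CATEGORIES[key]
-- ===== SOURCE B (Python) =====
-- import bisect
--
-- TEMPERATURE_CATEGORIES = {
--     'Extreme Cold': 'High risk of hypothermia and frostbite. Protective clothing is essential. Wind chill can make it feel much colder than the actual temperature.',
--     'Cold': 'Risk of hypothermia if exposed for long periods without proper clothing. Generally uncomfortable for extended outdoor activities without protection.',
--     'Cool': 'Mildly uncomfortable without appropriate clothing. Safe for most outdoor activities with proper attire.',
--     'Mild': 'Comfortable for most outdoor activities. Light to moderate clothing is suitable.',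
--     'Warm': 'Generally comfortable. Ideal for outdoor activities.',
--     'Hot': 'Can be uncomfortable, especially with high humidity. Heat-related illnesses can occur with prolonged exposure and activity.',
--     'Very Hot': 'High risk of heat-related illnesses. Limit strenuous activities and ensure adequate hydration.',
--     'Extreme Heat': 'Severe risk of heat-related illnesses. Avoid strenuous activities, seek shade, and stay hydrated.'
-- }
--
-- _OPTIONS = ['Extreme Cold', 'Cold', 'Cool', 'Mild', 'Warm', 'Hot', 'Very Hot', 'Extreme Heat']
-- _THRESHOLDS = [32, 50, 59, 70, 81, 90, 100]
--
-- def get_temp_rating(degrees):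
--     key = _OPTIONS[bisect.bisect_left(_THRESHOLDS, degrees)]
--     return key, TEMPERATURE_CATEGORIES[key]
-- ===== Notes on version B (the rewrite author's own statement) =====
-- stated objective: idiomatic
-- what changed: Replaces the early-return linear scan over enumerated thresholds with a single bisect.bisect_left binary search into the sorted threshold list to pick the category index.
import Mathlib
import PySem

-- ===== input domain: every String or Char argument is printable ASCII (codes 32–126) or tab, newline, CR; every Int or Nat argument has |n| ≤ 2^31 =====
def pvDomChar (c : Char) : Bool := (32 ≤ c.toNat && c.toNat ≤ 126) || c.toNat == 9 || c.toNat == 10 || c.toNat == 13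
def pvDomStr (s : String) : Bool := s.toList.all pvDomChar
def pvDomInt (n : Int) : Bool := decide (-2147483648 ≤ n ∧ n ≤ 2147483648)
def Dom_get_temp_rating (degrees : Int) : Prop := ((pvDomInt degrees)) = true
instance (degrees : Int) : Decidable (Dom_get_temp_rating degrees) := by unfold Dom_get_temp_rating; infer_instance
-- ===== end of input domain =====

-- B replaces A's early-return linear scan with a binary search (bisect_left) into the
-- sorted threshold list; equivalence of the two index computations is proved for all ints.

-- ===== PORT A =====
def tempCategories : PySem.Dict String String :=
  PySem.Dict.ofList
  [("Extreme Cold", "High risk of hypothermia and frostbite. Protective clothing is essential. Wind chill can make it feel much colder than the actual temperature."),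
   ("Cold", "Risk of hypothermia if exposed for long periods without proper clothing. Generally uncomfortable for extended outdoor activities without protection."),
   ("Cool", "Mildly uncomfortable without appropriate clothing. Safe for most outdoor activities with proper attire."),
   ("Mild", "Comfortable for most outdoor activities. Light to moderate clothing is suitable."),
   ("Warm", "Generally comfortable. Ideal for outdoor activities."),
   ("Hot", "Can be uncomfortable, especially with high humidity. Heat-related illnesses can occur with prolonged exposure and activity."),
   ("Very Hot", "High risk of heat-related illnesses. Limit strenuous activities and ensure adequate hydration."),
   ("Extreme Heat", "Severe risk of heat-related illnesses. Avoid strenuous activities, seek shade, and stay hydrated.")]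

def tempOptions : List String :=
  ["Extreme Cold", "Cold", "Cool", "Mild", "Warm", "Hot", "Very Hot", "Extreme Heat"]

-- the for-loop over enumerate([...]) with early return, as structural recursion
def tempLoopA (degrees : Int) : List (Int × Int) → Option (String × String)
  | [] => none
  | (i, extrema) :: rest =>
      if degrees ≤ extrema then
        let key := PySem.List.pyGetD tempOptions i ""
        some (key, PySem.Dict.getD tempCategories key "")
      else tempLoopA degrees rest

def get_temp_rating (degrees : Int) : String × String :=
  match tempLoopA degrees (PySem.List.enumerate [32, 50, 59, 70, 81, 90, 100]) with
  | some r => r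
  | none =>
      let key := PySem.List.pyGetD tempOptions (-1) ""
      (key, PySem.Dict.getD tempCategories key "")

-- ===== PORT B =====
def get_temp_rating_alt (degrees : Int) : String × String :=
  let key := PySem.List.pyGetD tempOptions (PySem.List.bisectLeft [32, 50, 59, 70, 81, 90, 100] degrees) ""
  (key, PySem.Dict.getD tempCategories key "")

-- ===== PRECONDITION & SPEC =====
def Spec_get_temp_rating (degrees : Int) (out : String × String) : Prop := out = get_temp_rating_alt degrees
instance (degrees : Int) (out : String × String) : Decidable (Spec_get_temp_rating degrees out) := by unfold Spec_get_temp_rating; infer_instance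

-- ===== CLAIM (what is proved, stated in full; the proofs are below) =====
def Claim_equal_get_temp_rating : Prop := ∀ (degrees : Int), Dom_get_temp_rating degrees → Spec_get_temp_rating degrees (get_temp_rating degrees)

-- ===== LEMMAS AND PROOFS =====

-- ===== VERDICT (by name: the statement is the Claim_ definition above) =====
theorem get_temp_rating_spec : Claim_equal_get_temp_rating := by
  intro d _
  unfold Spec_get_temp_rating get_temp_rating get_temp_rating_alt
  by_cases h1 : d ≤ 32
  ·
    have hb : PySem.List.bisectLeft [32, 50, 59, 70, 81, 90, 100] d = 0 := by
      simp [PySem.List.bisectLeft, PySem.List.bisectLeftLoop, show ¬((70:Int) < d) from by omega, show ¬((50:Int) < d) from by omega, show ¬((32:Int) < d) from by omega]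
    simp [tempLoopA, PySem.List.enumerate, hb, h1]
  by_cases h2 : d ≤ 50
  ·
    have hb : PySem.List.bisectLeft [32, 50, 59, 70, 81, 90, 100] d = 1 := by
      simp [PySem.List.bisectLeft, PySem.List.bisectLeftLoop, show ¬((70:Int) < d) from by omega, show ¬((50:Int) < d) from by omega, show (32:Int) < d from by omega]
    simp [tempLoopA, PySem.List.enumerate, hb, h1, h2]
  by_cases h3 : d ≤ 59
  ·
    have hb : PySem.List.bisectLeft [32, 50, 59, 70, 81, 90, 100] d = 2 := by
      simp [PySem.List.bisectLeft, PySem.List.bisectLeftLoop, show ¬((70:Int) < d) from by omega, show (50:Int) < d from by omega, show ¬((59:Int) < d) from by omega]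
    simp [tempLoopA, PySem.List.enumerate, hb, h1, h2, h3]
  by_cases h4 : d ≤ 70
  ·
    have hb : PySem.List.bisectLeft [32, 50, 59, 70, 81, 90, 100] d = 3 := by
      simp [PySem.List.bisectLeft, PySem.List.bisectLeftLoop, show ¬((70:Int) < d) from by omega, show (50:Int) < d from by omega, show (59:Int) < d from by omega]
    simp [tempLoopA, PySem.List.enumerate, hb, h1, h2, h3, h4]
  by_cases h5 : d ≤ 81
  ·
    have hb : PySem.List.bisectLeft [32, 50, 59, 70, 81, 90, 100] d = 4 := by
      simp [PySem.List.bisectLeft, PySem.List.bisectLeftLoop, show (70:Int) < d from by omega, show ¬((90:Int) < d) from by omega, show ¬((81:Int) < d) from by omega]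
    simp [tempLoopA, PySem.List.enumerate, hb, h1, h2, h3, h4, h5]
  by_cases h6 : d ≤ 90
  ·
    have hb : PySem.List.bisectLeft [32, 50, 59, 70, 81, 90, 100] d = 5 := by
      simp [PySem.List.bisectLeft, PySem.List.bisectLeftLoop, show (70:Int) < d from by omega, show ¬((90:Int) < d) from by omega, show (81:Int) < d from by omega]
    simp [tempLoopA, PySem.List.enumerate, hb, h1, h2, h3, h4, h5, h6]
  by_cases h7 : d ≤ 100
  ·
    have hb : PySem.List.bisectLeft [32, 50, 59, 70, 81, 90, 100] d = 6 := by
      simp [PySem.List.bisectLeft, PySem.List.bisectLeftLoop, show (70:Int) < d from by omega, show (90:Int) < d from by omega, show ¬((100:Int) < d) from by omega]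
    simp [tempLoopA, PySem.List.enumerate, hb, h1, h2, h3, h4, h5, h6, h7]
  ·
    have hb : PySem.List.bisectLeft [32, 50, 59, 70, 81, 90, 100] d = 7 := by
      simp [PySem.List.bisectLeft, PySem.List.bisectLeftLoop, show (70:Int) < d from by omega, show (90:Int) < d from by omega, show (100:Int) < d from by omega]
    simp [tempLoopA, PySem.List.enumerate, hb, h1, h2, h3, h4, h5, h6, h7]
    decide
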